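-- pv_equiv track=rewrite | github.com/thebridge0491/intro_py | api/intro_py/practice/classic.py | range_step_lp
-- ===== SOURCE A (Python) =====
-- import sys, logging, inspect, operator
--
-- def range_step_lp(step, start, stop):
--     cmp_op = operator.gt if step > 0 else operator.lt
--     acc, cur = [], start
--     #
--     while True:
--         if cmp_op(cur, stop): break
--         acc += [cur]
--         cur = cur + step
--     return acc
-- ===== SOURCE B (Python) =====
-- def range_step_lp(step, start, stop):
--     # Closed form: count the elements with one floor division, then build the
--     # list directly by index (no accumulator loop).
--     n = (stop - start) // step + 1
--     return [start + k * step for k in range(n)]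
-- ===== Notes on version B (the rewrite author's own statement) =====
-- stated objective: simpler
-- what changed: Replaced the while-True accumulator loop (one iteration and one list concatenation per element) with a closed-form element count via floor division and a direct list comprehension over range(n).
-- outside the precondition, e.g. on range_step_lp(0, 0, 5): A returns [], B raises ZeroDivisionError; on range_step_lp(0, 5, 0): A does not finish within the time limit, B raises ZeroDivisionError
import Mathlib
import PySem

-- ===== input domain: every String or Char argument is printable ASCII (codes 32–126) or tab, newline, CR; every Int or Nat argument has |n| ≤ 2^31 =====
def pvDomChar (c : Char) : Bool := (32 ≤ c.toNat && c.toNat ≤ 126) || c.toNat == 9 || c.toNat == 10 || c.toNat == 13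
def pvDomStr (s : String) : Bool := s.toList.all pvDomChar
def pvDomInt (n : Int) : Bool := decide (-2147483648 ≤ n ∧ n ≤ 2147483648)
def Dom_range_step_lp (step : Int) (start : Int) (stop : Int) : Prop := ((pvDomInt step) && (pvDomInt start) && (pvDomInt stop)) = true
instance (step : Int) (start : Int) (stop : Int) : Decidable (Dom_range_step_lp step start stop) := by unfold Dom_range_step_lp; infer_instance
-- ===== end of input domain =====

-- B replaces A's while-True accumulator loop by a closed-form element count
-- (one floor division) and a direct comprehension over range(n); objective: simpler.

-- ===== PORT A =====
-- A's while-True loop, step for step; 'fuel' is only a totality guard (Python has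
-- no such counter): under Pre_ (step ≠ 0) the initial fuel below always suffices,
-- so the fuel-exhausted branch is never reached; for step = 0 Python loops forever.
def rangeStepLoopA (step stop : Int) : Nat → Int → List Int → List Int
  | 0, _, acc => acc
  | fuel + 1, cur, acc =>
    if (if step > 0 then cur > stop else cur < stop) then acc
    else rangeStepLoopA step stop fuel (cur + step) (acc ++ [cur])

def range_step_lp (step : Int) (start : Int) (stop : Int) : List Int :=
  rangeStepLoopA step stop
    ((if step > 0 then stop - start + step else start - stop - step).toNat + 1) start []

-- ===== PORT B =====
def range_step_lp_alt (step : Int) (start : Int) (stop : Int) : List Int :=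
  let n : Int := PySem.Int.floordiv (stop - start) step + 1
  (PySem.List.pyRange 0 n 1).map (fun k => start + k * step)

-- ===== PRECONDITION & SPEC =====
-- Pre_ excludes step = 0, on which Python A loops forever (when the comparison
-- never fires) or returns [] (start < stop), while B's floor division by step raises.
def Pre_range_step_lp (step : Int) (start : Int) (stop : Int) : Prop := step ≠ 0
instance (step : Int) (start : Int) (stop : Int) : Decidable (Pre_range_step_lp step start stop) := by unfold Pre_range_step_lp; infer_instance

def pvWitness_range_step_lp : Int × Int × Int := (2, 1, 7)

def Spec_range_step_lp (step : Int) (start : Int) (stop : Int) (out : List Int) : Prop := out = range_step_lp_alt step start stop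
instance (step : Int) (start : Int) (stop : Int) (out : List Int) : Decidable (Spec_range_step_lp step start stop out) := by unfold Spec_range_step_lp; infer_instance

-- ===== CLAIM (what is proved, stated in full; the proofs are below) =====
def Claim_equal_range_step_lp : Prop := ∀ (step : Int) (start : Int) (stop : Int), Dom_range_step_lp step start stop → Pre_range_step_lp step start stop → Spec_range_step_lp step start stop (range_step_lp step start stop)

-- ===== LEMMAS AND PROOFS =====

-- the closed-form count B uses, as a function of the loop's current value
def rangeCount (step stop cur : Int) : Int := PySem.Int.floordiv (stop - cur) step + 1

lemma rangeCount_nonpos (step stop cur : Int) (hs : step ≠ 0)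
    (h : if step > 0 then cur > stop else cur < stop) : rangeCount step stop cur ≤ 0 := by
  unfold rangeCount
  by_cases hp : step > 0
  · simp only [hp, if_pos] at h
    have := (PySem.Int.floordiv_lt_iff_lt_mul (a := stop - cur) (q := 0) hp).2 (by omega)
    omega
  · simp only [hp, if_false] at h
    have hneg : 0 < -step := by omega
    rw [← PySem.Int.floordiv_neg_neg (stop - cur) step]
    have := (PySem.Int.floordiv_lt_iff_lt_mul (a := -(stop - cur)) (q := 0) hneg).2 (by omega)
    omega

lemma rangeCount_pos (step stop cur : Int) (hs : step ≠ 0)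
    (h : ¬ (if step > 0 then cur > stop else cur < stop)) : 0 < rangeCount step stop cur := by
  unfold rangeCount
  by_cases hp : step > 0
  · simp only [hp, if_pos] at h
    have := (PySem.Int.le_floordiv_iff_mul_le (a := stop - cur) (q := 0) hp).2 (by omega)
    omega
  · simp only [hp, if_false] at h
    have hneg : 0 < -step := by omega
    rw [← PySem.Int.floordiv_neg_neg (stop - cur) step]
    have := (PySem.Int.le_floordiv_iff_mul_le (a := -(stop - cur)) (q := 0) hneg).2 (by omega)
    omega

lemma rangeCount_step (step stop cur : Int) (hs : step ≠ 0) :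
    rangeCount step stop (cur + step) = rangeCount step stop cur - 1 := by
  unfold rangeCount PySem.Int.floordiv
  have : stop - (cur + step) = (stop - cur) + (-1) * step := by ring
  rw [this, Int.add_mul_fdiv_right _ _ hs]
  omega

-- with enough fuel, the loop result is 'acc ++ the closed form started at cur'
lemma rangeStepLoopA_eq (step stop : Int) (hs : step ≠ 0) :
    ∀ (fuel : Nat) (cur : Int) (acc : List Int), rangeCount step stop cur ≤ (fuel : Int) →
      rangeStepLoopA step stop fuel cur acc =
        acc ++ (List.range (rangeCount step stop cur).toNat).map (fun k : Nat => cur + (k : Int) * step) := by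
  intro fuel
  induction fuel with
  | zero =>
    intro cur acc hf
    have h0 : (rangeCount step stop cur).toNat = 0 := by omega
    rw [rangeStepLoopA, h0]
    simp
  | succ fuel ih =>
    intro cur acc hf
    rw [rangeStepLoopA]
    by_cases h : if step > 0 then cur > stop else cur < stop
    · rw [if_pos h]
      have := rangeCount_nonpos step stop cur hs h
      have h0 : (rangeCount step stop cur).toNat = 0 := by omega
      rw [h0]
      simp
    · rw [if_neg h]
      have hpos := rangeCount_pos step stop cur hs h
      have hstep := rangeCount_step step stop cur hs
      rw [ih (cur + step) (acc ++ [cur]) (by omega)]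
      have hn : (rangeCount step stop cur).toNat = (rangeCount step stop (cur + step)).toNat + 1 := by
        omega
      rw [hn, List.range_succ_eq_map, List.append_assoc, List.map_cons, List.map_map]
      congr 1
      rw [List.singleton_append]
      congr 1
      · simp
      · apply List.map_congr_left
        intro k _
        simp [Function.comp]
        ring

-- the initial fuel of port A always suffices (floor division bound)
lemma rangeCount_le_initFuel (step start stop : Int) (hs : step ≠ 0) :
    rangeCount step stop start ≤
      (((if step > 0 then stop - start + step else start - stop - step).toNat + 1 : Nat) : Int) := by
  unfold rangeCount
  have key : ∀ a b : Int, 0 < b → PySem.Int.floordiv a b ≤ max a 0 := by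
    intro a b hb
    have := (PySem.Int.floordiv_lt_iff_lt_mul (a := a) (q := max a 0 + 1) hb).2 (by nlinarith [le_max_left a 0, le_max_right a 0])
    omega
  by_cases hp : step > 0
  · have := key (stop - start) step hp
    simp only [hp, if_pos]
    push_cast
    omega
  · have hneg : 0 < -step := by omega
    rw [← PySem.Int.floordiv_neg_neg (stop - start) step]
    have := key (-(stop - start)) (-step) hneg
    simp only [hp, if_false]
    push_cast
    omega

theorem range_step_lp_spec_aux (step start stop : Int) (hs : step ≠ 0) :
    range_step_lp step start stop = range_step_lp_alt step start stop := by
  unfold range_step_lp range_step_lp_alt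
  rw [rangeStepLoopA_eq step stop hs _ start [] (rangeCount_le_initFuel step start stop hs)]
  simp only [PySem.List.pyRange_one, List.map_map, List.nil_append, Int.sub_zero]
  apply List.map_congr_left
  intro k _
  simp [Function.comp]

-- ===== VERDICT (by name: the statement is the Claim_ definition above) =====
theorem range_step_lp_spec : Claim_equal_range_step_lp := by
  intro step start stop _ hpre
  exact range_step_lp_spec_aux step start stop hpre
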